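-- pv_equiv track=rewrite | github.com/vivekkanissery/Code4fun | ctci-python/chapter-1/4.py | solution
-- ===== SOURCE A (Python) =====
-- def solution(s):
--     char_set = set()
--     for i in s:
--         if i in char_set:
--             char_set.discard(i)
--         else:
--             char_set.add(i)
--     return len(char_set)<2
-- ===== SOURCE B (Python) =====
-- def solution(s):
--     def odd_groups(chars):
--         if not chars:
--             return 0
--         c = chars[0]
--         rest = [x for x in chars if x != c]
--         return (len(chars) - len(rest)) % 2 + odd_groups(rest)
--     return odd_groups(list(s)) <= 1
-- ===== Notes on version B (the rewrite author's own statement) =====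
-- stated objective: alternative
-- what changed: Replaces A's one-pass membership-toggle set with a recursive partition: repeatedly strip every occurrence of the first remaining character, add that character's multiplicity mod 2, and finally test that at most one character has odd multiplicity; no set, no per-character branching.
import Mathlib
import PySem

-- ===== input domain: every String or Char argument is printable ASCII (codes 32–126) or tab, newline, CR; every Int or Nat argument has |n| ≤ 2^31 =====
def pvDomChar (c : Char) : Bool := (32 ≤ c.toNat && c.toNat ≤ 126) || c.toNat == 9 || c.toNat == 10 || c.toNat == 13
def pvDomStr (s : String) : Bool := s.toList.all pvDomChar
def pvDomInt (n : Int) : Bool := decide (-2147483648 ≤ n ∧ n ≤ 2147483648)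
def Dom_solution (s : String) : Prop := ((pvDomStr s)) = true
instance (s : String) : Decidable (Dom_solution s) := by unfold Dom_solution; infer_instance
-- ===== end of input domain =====

-- B replaces A's one-pass membership-toggle set with a recursive partition that repeatedly
-- strips all occurrences of the first remaining character, summing the parities (alternative; same result).

-- ===== PORT A =====
-- parity-toggle loop over the characters, then len(char_set) < 2
def solution (s : String) : Bool :=
  let char_set : PySem.Set Char :=
    s.toList.foldl
      (fun st i => if PySem.Set.contains st i then PySem.Set.discard st i else PySem.Set.add st i)
      PySem.Set.empty
  decide (PySem.Set.len char_set < 2)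

-- ===== PORT B =====
-- odd_groups: if chars empty return 0; else strip every occurrence of chars[0],
-- add (len(chars) - len(rest)) % 2, recurse on rest
def oddGroups : List Char → Int
  | [] => 0
  | c :: t =>
    let rest := (c :: t).filter (fun x => x != c)
    PySem.Int.mod (((c :: t).length : Int) - (rest.length : Int)) 2 + oddGroups rest
termination_by xs => xs.length
decreasing_by
  simp only [List.filter_cons, bne_self_eq_false, List.length_cons]
  exact Nat.lt_succ_of_le (List.length_filter_le _ _)

def solution_alt (s : String) : Bool :=
  decide (oddGroups s.toList ≤ 1)

-- ===== PRECONDITION & SPEC =====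
def Spec_solution (s : String) (out : Bool) : Prop := out = solution_alt s
instance (s : String) (out : Bool) : Decidable (Spec_solution s out) := by unfold Spec_solution; infer_instance

-- ===== CLAIM =====
def Claim_equal_solution : Prop := ∀ (s : String), Dom_solution s → Spec_solution s (solution s)

-- ===== LEMMAS AND PROOFS =====

-- A's loop invariant: the toggle set stays duplicate-free and holds exactly the characters
-- whose membership parity in the start set XOR count-parity in the remaining input is odd.
lemma toggle_inv (xs : List Char) : ∀ (st : PySem.Set Char), st.Nodup →
    (xs.foldl (fun st i => if PySem.Set.contains st i then PySem.Set.discard st i else PySem.Set.add st i) st).Nodup ∧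
    ∀ c, c ∈ xs.foldl (fun st i => if PySem.Set.contains st i then PySem.Set.discard st i else PySem.Set.add st i) st
         ↔ ((c ∈ st) ↔ xs.count c % 2 = 0) := by
  induction xs with
  | nil => intro st h; simpa using h
  | cons x xs ih =>
    intro st h
    have hstep : (if PySem.Set.contains st x then PySem.Set.discard st x else PySem.Set.add st x).Nodup := by
      split
      · exact PySem.Set.nodup_discard st x h
      · exact PySem.Set.nodup_add st x h
    have hstepmem : ∀ c, (c ∈ if PySem.Set.contains st x then PySem.Set.discard st x else PySem.Set.add st x)
        ↔ (if c = x then x ∉ st else c ∈ st) := by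
      intro c
      by_cases hm : x ∈ st
      · rw [if_pos ((PySem.Set.contains_iff st x).2 hm), PySem.Set.mem_discard]
        by_cases hcx : c = x
        · subst hcx; simp [hm]
        · simp [hcx]
      · have hc : PySem.Set.contains st x = false := by
          by_contra hcc
          exact hm ((PySem.Set.contains_iff st x).1 (by simpa using hcc))
        rw [hc]
        simp only [Bool.false_eq_true, if_false, PySem.Set.mem_add]
        by_cases hcx : c = x
        · subst hcx; simp [hm]
        · simp [hcx]
    obtain ⟨h1, h2⟩ := ih _ hstep
    refine ⟨h1, fun c => ?_⟩
    rw [List.foldl_cons, h2 c, hstepmem c]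
    by_cases hcx : c = x
    · subst hcx
      rw [if_pos rfl, List.count_cons_self]
      by_cases hm : c ∈ st <;> simp [hm] <;> omega
    · rw [if_neg hcx, List.count_cons_of_ne (fun he => hcx he.symm)]

-- removing every occurrence of c removes exactly count c elements
lemma filter_ne_length (L : List Char) (c : Char) :
    (L.filter (fun x => x != c)).length + L.count c = L.length := by
  induction L with
  | nil => simp
  | cons a t ih =>
    by_cases h : a = c
    · subst h; simp; omega
    · simp [h, bne_iff_ne, Ne]
      omega

-- B's recursion counts the distinct characters of odd multiplicity.
lemma oddGroups_eq : ∀ (n : Nat) (xs : List Char), xs.length ≤ n →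
    oddGroups xs = ((PySem.Set.ofList xs).countP (fun k => xs.count k % 2 == 1) : Int) := by
  intro n
  induction n with
  | zero =>
    intro xs h
    have : xs = [] := List.eq_nil_of_length_eq_zero (Nat.le_zero.1 h)
    subst this; simp [oddGroups, PySem.Set.ofList]
  | succ n ih =>
    intro xs h
    match xs with
    | [] => simp [oddGroups, PySem.Set.ofList]
    | c :: t =>
      rw [oddGroups]
      set L := c :: t with hL
      set rest := L.filter (fun x => x != c) with hrest
      have hrt : rest = t.filter (fun x => x != c) := by
        simp [hrest, hL]
      have hrlen : rest.length ≤ n := by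
        rw [hrt]
        exact le_trans (List.length_filter_le _ _)
          (Nat.le_of_succ_le_succ (by simpa [hL] using h))
      -- multiplicity of c: length L - length rest
      have hsplit : rest.length + L.count c = L.length := by
        rw [hrest]; exact filter_ne_length L c
      have hcount : ((L.length : Int) - (rest.length : Int)) = (L.count c : Int) := by
        omega
      -- counts of other characters are unchanged in rest
      have hck : ∀ k, k ≠ c → rest.count k = L.count k := by
        intro k hk
        rw [hrest]
        exact List.count_filter (by simp [hk])
      have hmemrest : ∀ x, x ∈ rest ↔ (x ∈ L ∧ x ≠ c) := by
        intro x; simp [hrest, List.mem_filter]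
      -- distinct lists: ofList L ~ c :: (ofList L).erase c, and (ofList L).erase c ~ ofList rest
      have hcL : c ∈ PySem.Set.ofList L := by
        rw [PySem.Set.mem_ofList]; exact List.mem_cons_self
      have hperm1 : (PySem.Set.ofList L).Perm (c :: (PySem.Set.ofList L).erase c) :=
        List.perm_cons_erase hcL
      have hndL := PySem.Set.nodup_ofList L
      have hperm2 : ((PySem.Set.ofList L).erase c).Perm (PySem.Set.ofList rest) := by
        rw [List.perm_ext_iff_of_nodup (hndL.erase c) (PySem.Set.nodup_ofList rest)]
        intro x
        rw [hndL.mem_erase_iff, PySem.Set.mem_ofList, PySem.Set.mem_ofList, hmemrest x]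
        tauto
      rw [ih rest hrlen]
      have hcongr : (PySem.Set.ofList rest).countP (fun k => rest.count k % 2 == 1)
          = (PySem.Set.ofList rest).countP (fun k => L.count k % 2 == 1) := by
        apply List.countP_congr
        intro k hk
        have : k ≠ c := ((hmemrest k).1 ((PySem.Set.mem_ofList rest k).1 hk)).2
        rw [hck k this]
      rw [hcongr]
      have hmain : (PySem.Set.ofList L).countP (fun k => L.count k % 2 == 1)
          = (if L.count c % 2 == 1 then 1 else 0) + (PySem.Set.ofList rest).countP (fun k => L.count k % 2 == 1) := by
        rw [hperm1.countP_eq, List.countP_cons, hperm2.countP_eq]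
        split <;> simp_all; omega
      rw [hmain, hcount]
      have hmod : PySem.Int.mod ((L.count c : Nat) : Int) 2 = ((L.count c % 2 : Nat) : Int) := by
        exact_mod_cast PySem.Int.mod_natCast (L.count c) 2
      rw [hmod]
      by_cases hodd : L.count c % 2 = 1
      · simp [hodd]
      · have h2 : L.count c % 2 = 0 := by omega
        simp [h2]

-- ===== VERDICT =====
theorem solution_spec : Claim_equal_solution := by
  unfold Claim_equal_solution Spec_solution
  intro s _
  unfold solution solution_alt
  simp only []
  set xs := s.toList with hxs
  obtain ⟨hnd, hmem⟩ := toggle_inv xs PySem.Set.empty (by simp [PySem.Set.empty])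
  set F := xs.foldl (fun st i => if PySem.Set.contains st i then PySem.Set.discard st i else PySem.Set.add st i) PySem.Set.empty with hF
  have hmemF : ∀ c, c ∈ F ↔ xs.count c % 2 = 1 := by
    intro c
    rw [hmem c]
    simp [PySem.Set.empty]
  have hperm : F.Perm ((PySem.Set.ofList xs).filter (fun k => xs.count k % 2 == 1)) := by
    rw [List.perm_ext_iff_of_nodup hnd (List.Nodup.filter _ (PySem.Set.nodup_ofList xs))]
    intro c
    rw [hmemF c, List.mem_filter, PySem.Set.mem_ofList]
    constructor
    · intro hc
      refine ⟨?_, by simpa using hc⟩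
      have : xs.count c ≠ 0 := by omega
      exact List.count_pos_iff.1 (Nat.pos_of_ne_zero this)
    · intro ⟨_, hc⟩; simpa using hc
  have hlen : PySem.Set.len F = ((PySem.Set.ofList xs).countP (fun k => xs.count k % 2 == 1) : Int) := by
    have := hperm.length_eq
    rw [← List.countP_eq_length_filter] at this
    simp [PySem.Set.len, this]
  rw [oddGroups_eq xs.length xs le_rfl]
  simp only [hlen, decide_eq_decide]
  omega
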